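-- pv_equiv track=rewrite | github.com/Hernan-Voolkia/appinsbudget | main.py | fnCmbTrasero
-- ===== SOURCE A (Python) =====
-- def fnCmbTrasero(input):
--     valores = input.split('-')
--     cBaul_Portón_DerCam =1
--     cGuardabarro_DerCam =7
--     cGuardabarro_IzaCam =9
--     cPanel_Cola_DerCam  =13
--     cParagolpe_DerCam   =15
--     bfDisplay = ''
--
--     for indice, valor in enumerate(valores):
--         if valor == '1':
--             if indice+1 == cBaul_Portón_DerCam:
--                 bfDisplay += 'B'
--             elif indice+1 == cGuardabarro_DerCam:
--                 bfDisplay += 'Gd'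
--             elif indice+1 == cGuardabarro_IzaCam:
--                 bfDisplay += 'Gi'
--             elif indice+1 == cPanel_Cola_DerCam:
--                 bfDisplay += 'C'
--             elif indice+1 == cParagolpe_DerCam:
--                 bfDisplay += 'P'
--     return bfDisplay
-- ===== SOURCE B (Python) =====
-- _TABLE = ((1, 'B'), (7, 'Gd'), (9, 'Gi'), (13, 'C'), (15, 'P'))
--
-- def fnCmbTrasero(input):
--     valores = input.split('-')
--     return ''.join(code for pos, code in _TABLE
--                    if pos - 1 < len(valores) and valores[pos - 1] == '1')
-- ===== Notes on version B (the rewrite author's own statement) =====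
-- stated objective: simpler
-- what changed: Replaces the enumerate loop with its if/elif chain by a fixed (position, code) table scanned once: only the five relevant positions are probed (with a bounds guard) and the codes are joined, instead of walking every split field.
import Mathlib
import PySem

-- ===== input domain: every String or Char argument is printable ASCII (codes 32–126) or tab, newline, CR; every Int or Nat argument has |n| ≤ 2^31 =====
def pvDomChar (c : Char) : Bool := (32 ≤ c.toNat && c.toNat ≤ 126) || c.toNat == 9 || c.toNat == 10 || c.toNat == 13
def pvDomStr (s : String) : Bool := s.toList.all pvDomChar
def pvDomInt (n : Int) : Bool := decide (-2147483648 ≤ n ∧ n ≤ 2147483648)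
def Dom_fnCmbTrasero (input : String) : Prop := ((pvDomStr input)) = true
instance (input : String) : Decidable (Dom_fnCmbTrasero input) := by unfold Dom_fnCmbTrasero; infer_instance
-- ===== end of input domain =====

-- B replaces A's enumerate loop with an if/elif chain by a scan of a fixed (position, code) table; objective: simpler.

-- ===== PORT A =====
def fnCmbTrasero (input : String) : String :=
  let valores : List String := (PySem.Str.split? input "-").getD []
  (PySem.List.enumerate valores).foldl
    (fun bfDisplay p =>
      if p.2 = "1" then
        if p.1 + 1 = 1 then bfDisplay ++ "B"
        else if p.1 + 1 = 7 then bfDisplay ++ "Gd"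
        else if p.1 + 1 = 9 then bfDisplay ++ "Gi"
        else if p.1 + 1 = 13 then bfDisplay ++ "C"
        else if p.1 + 1 = 15 then bfDisplay ++ "P"
        else bfDisplay
      else bfDisplay) ""

-- ===== PORT B =====
def fnTable : List (Nat × String) := [(1, "B"), (7, "Gd"), (9, "Gi"), (13, "C"), (15, "P")]

def fnCmbTrasero_alt (input : String) : String :=
  let valores : List String := (PySem.Str.split? input "-").getD []
  PySem.Str.join ""
    ((fnTable.filter (fun pc =>
        decide (pc.1 - 1 < valores.length) && decide (valores.getD (pc.1 - 1) "" = "1"))).map (·.2))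

-- ===== PRECONDITION & SPEC =====
def Spec_fnCmbTrasero (input : String) (out : String) : Prop := out = fnCmbTrasero_alt input
instance (input : String) (out : String) : Decidable (Spec_fnCmbTrasero input out) := by unfold Spec_fnCmbTrasero; infer_instance

-- ===== CLAIM (what is proved, stated in full; the proofs are below) =====
def Claim_equal_fnCmbTrasero : Prop := ∀ (input : String), Dom_fnCmbTrasero input → Spec_fnCmbTrasero input (fnCmbTrasero input)

-- ===== LEMMAS AND PROOFS =====

-- proof-only helper: the code contributed by flag position `pos` (1-based) when the loop has already
-- consumed the first `n` fields, `vs` being the remaining fields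
def pvPick (vs : List String) (n pos : Nat) (c : String) : String :=
  if n < pos ∧ vs[pos - 1 - n]? = some "1" then c else ""

theorem pvPick_nil (n pos : Nat) (c : String) : pvPick [] n pos c = "" := by
  simp [pvPick]

theorem pvPick_empty (vs : List String) (n pos : Nat) (c : String) (h : pos ≤ n) :
    pvPick vs n pos c = "" := by
  simp [pvPick]; omega

theorem pvPick_cons (v : String) (vs : List String) (n pos : Nat) (c : String) (_hpos : 1 ≤ pos) :
    pvPick (v :: vs) n pos c =
      if n + 1 = pos then (if v = "1" then c else "") else pvPick vs (n + 1) pos c := by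
  by_cases h : n + 1 = pos
  · have h0 : pos - 1 - n = 0 := by omega
    have hlt : n < pos := by omega
    simp [pvPick, h, h0, hlt]
  · by_cases hlt : n < pos
    · have h1 : pos - 1 - n = (pos - 1 - (n + 1)) + 1 := by omega
      have h2 : n + 1 < pos := by omega
      simp [pvPick, h, h1, hlt, h2]
    · have h2 : ¬ n + 1 < pos := by omega
      simp [pvPick, h, hlt, h2]

-- loop invariant for A's fold, with the enumerate counter started at n
theorem pvLoopInv (vs : List String) : ∀ (n : Nat) (acc : String),
    (PySem.List.enumerate vs (n : Int)).foldl
      (fun bfDisplay p =>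
        if p.2 = "1" then
          if p.1 + 1 = 1 then bfDisplay ++ "B"
          else if p.1 + 1 = 7 then bfDisplay ++ "Gd"
          else if p.1 + 1 = 9 then bfDisplay ++ "Gi"
          else if p.1 + 1 = 13 then bfDisplay ++ "C"
          else if p.1 + 1 = 15 then bfDisplay ++ "P"
          else bfDisplay
        else bfDisplay) acc
    = acc ++ pvPick vs n 1 "B" ++ pvPick vs n 7 "Gd" ++ pvPick vs n 9 "Gi"
          ++ pvPick vs n 13 "C" ++ pvPick vs n 15 "P" := by
  induction vs with
  | nil => intro n acc; simp [PySem.List.enumerate, pvPick_nil]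
  | cons v vs ih =>
    intro n acc
    rw [PySem.List.enumerate_cons, List.foldl_cons]
    have hn : ((n : Int) + 1) = ((n + 1 : Nat) : Int) := by push_cast; ring
    rw [hn, ih (n + 1)]
    rw [pvPick_cons v vs n 1 "B" (by omega), pvPick_cons v vs n 7 "Gd" (by omega),
        pvPick_cons v vs n 9 "Gi" (by omega), pvPick_cons v vs n 13 "C" (by omega),
        pvPick_cons v vs n 15 "P" (by omega)]
    by_cases hv : v = "1"
    · by_cases h1 : n + 1 = 1
      · have h0 : n = 0 := by omega
        subst h0
        rw [pvPick_empty vs 1 1 "B" (by omega)]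
        simp [hv, String.append_assoc]
      · by_cases h7 : n + 1 = 7
        · have h0 : n = 6 := by omega
          subst h0
          rw [pvPick_empty vs 7 1 "B" (by omega), pvPick_empty vs 7 7 "Gd" (by omega)]
          simp [hv, String.append_assoc]
        · by_cases h9 : n + 1 = 9
          · have h0 : n = 8 := by omega
            subst h0
            rw [pvPick_empty vs 9 1 "B" (by omega), pvPick_empty vs 9 7 "Gd" (by omega),
                pvPick_empty vs 9 9 "Gi" (by omega)]
            simp [hv, String.append_assoc]
          · by_cases h13 : n + 1 = 13
            · have h0 : n = 12 := by omega
              subst h0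
              rw [pvPick_empty vs 13 1 "B" (by omega), pvPick_empty vs 13 7 "Gd" (by omega),
                  pvPick_empty vs 13 9 "Gi" (by omega), pvPick_empty vs 13 13 "C" (by omega)]
              simp [hv, String.append_assoc]
            · by_cases h15 : n + 1 = 15
              · have h0 : n = 14 := by omega
                subst h0
                rw [pvPick_empty vs 15 1 "B" (by omega), pvPick_empty vs 15 7 "Gd" (by omega),
                    pvPick_empty vs 15 9 "Gi" (by omega), pvPick_empty vs 15 13 "C" (by omega),
                    pvPick_empty vs 15 15 "P" (by omega)]
                simp [hv]
              · simp [hv, (show ¬ ((n : Int) + 1 = 1) by omega),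
                      (show ¬ ((n : Int) + 1 = 7) by omega), (show ¬ ((n : Int) + 1 = 9) by omega),
                      (show ¬ ((n : Int) + 1 = 13) by omega), (show ¬ ((n : Int) + 1 = 15) by omega),
                      (show ¬ n = 0 by omega), (show ¬ n = 6 by omega), (show ¬ n = 8 by omega),
                      (show ¬ n = 12 by omega), (show ¬ n = 14 by omega)]
    · have hB : ∀ (k : Nat) (c : String),
          (if n + 1 = k then "" else pvPick vs (n + 1) k c) = pvPick vs (n + 1) k c := by
        intro k c
        by_cases hk : n + 1 = k
        · rw [if_pos hk, pvPick_empty vs (n+1) k c (by omega)]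
        · rw [if_neg hk]
      simp only [if_neg hv, hB]

theorem pvLoopInv0 (vs : List String) (acc : String) :
    (PySem.List.enumerate vs).foldl
      (fun bfDisplay p =>
        if p.2 = "1" then
          if p.1 + 1 = 1 then bfDisplay ++ "B"
          else if p.1 + 1 = 7 then bfDisplay ++ "Gd"
          else if p.1 + 1 = 9 then bfDisplay ++ "Gi"
          else if p.1 + 1 = 13 then bfDisplay ++ "C"
          else if p.1 + 1 = 15 then bfDisplay ++ "P"
          else bfDisplay
        else bfDisplay) acc
    = acc ++ pvPick vs 0 1 "B" ++ pvPick vs 0 7 "Gd" ++ pvPick vs 0 9 "Gi"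
          ++ pvPick vs 0 13 "C" ++ pvPick vs 0 15 "P" := by
  simpa using pvLoopInv vs 0 acc

theorem pvFlatIntersperse (L : List (List Char)) :
    (List.intersperse [] L).flatten = L.flatten := by
  induction L with
  | nil => rfl
  | cons a t ih =>
    cases t with
    | nil => rfl
    | cons b t' => simp_all [List.intersperse]

theorem pvJoinEmptyCons (s : String) (parts : List String) :
    PySem.Str.join "" (s :: parts) = s ++ PySem.Str.join "" parts := by
  simp [PySem.Str.join, PySem.Chars.join, List.intercalate, pvFlatIntersperse]

theorem pvJoinFilter (P : Nat × String → Bool) (l : List (Nat × String)) :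
    PySem.Str.join "" ((l.filter P).map (·.2))
      = l.foldr (fun x acc => (if P x then x.2 else "") ++ acc) "" := by
  induction l with
  | nil => rfl
  | cons x t ih =>
    by_cases h : P x
    · simp [h, pvJoinEmptyCons, ih]
    · simp [h, ih]

-- B's table scan equals the five pvPick pieces at counter 0
theorem pvAltEq (vs : List String) :
    PySem.Str.join ""
      ((fnTable.filter (fun pc =>
          decide (pc.1 - 1 < vs.length) && decide (vs.getD (pc.1 - 1) "" = "1"))).map (·.2))
    = "" ++ pvPick vs 0 1 "B" ++ pvPick vs 0 7 "Gd" ++ pvPick vs 0 9 "Gi"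
          ++ pvPick vs 0 13 "C" ++ pvPick vs 0 15 "P" := by
  have hp : ∀ (pos : Nat) (c : String), 1 ≤ pos →
      pvPick vs 0 pos c = if pos - 1 < vs.length ∧ vs.getD (pos - 1) "" = "1" then c else "" := by
    intro pos c hpos
    have hcond : (0 < pos ∧ vs[pos - 1 - 0]? = some "1")
        ↔ (pos - 1 < vs.length ∧ vs.getD (pos - 1) "" = "1") := by
      simp only [Nat.sub_zero]
      by_cases hl : pos - 1 < vs.length
      · simp [List.getD_eq_getElem?_getD, hl, (show 0 < pos by omega)]
      · simp [hl]
    simp only [pvPick, hcond]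
  rw [pvJoinFilter]
  simp only [fnTable, List.foldr_cons, List.foldr_nil]
  rw [hp 1 "B" (by omega), hp 7 "Gd" (by omega), hp 9 "Gi" (by omega),
      hp 13 "C" (by omega), hp 15 "P" (by omega)]
  simp [String.append_assoc]

-- ===== VERDICT (by name: the statement is the Claim_ definition above) =====
theorem fnCmbTrasero_spec : Claim_equal_fnCmbTrasero := by
  intro input _
  unfold Spec_fnCmbTrasero fnCmbTrasero fnCmbTrasero_alt
  rw [pvLoopInv0, pvAltEq]
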